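-- pv_equiv track=rewrite | github.com/apple4ree/proj_tick_agent | src/strategy_block/strategy_registry/family_fingerprint.py | _coarse_feature_bucket
-- ===== SOURCE A (Python) =====
-- _MOTIF_PATTERNS: tuple[tuple[str, tuple[str, ...]], ...] = (
--     ("imbalance", ("imbalance", "ofi", "book_imb")),
--     ("momentum", ("momentum", "trend", "return", "roc", "velocity")),
--     ("spread_reversion", ("spread", "zscore", "reversion", "mean_rev")),
--     ("queue_depletion", ("queue", "depletion", "depth_drop", "book_depth")),
--     ("microprice", ("microprice", "micro_price", "book_pressure", "mid_gap")),
-- )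
--
-- def _coarse_feature_bucket(features: list[str]) -> str:
--     if not features:
--         return "none"
--     buckets: set[str] = set()
--     for feature in features:
--         for motif, patterns in _MOTIF_PATTERNS:
--             if any(pattern in feature for pattern in patterns):
--                 buckets.add(motif)
--         token = feature.split("_", 1)[0]
--         if token:
--             buckets.add(token[:20])
--     ordered = sorted(buckets)
--     return "+".join(ordered[:4]) if ordered else "none"
-- ===== SOURCE B (Python) =====
-- _MOTIF_PATTERNS: tuple[tuple[str, tuple[str, ...]], ...] = (
--     ("imbalance", ("imbalance", "ofi", "book_imb")),
--     ("momentum", ("momentum", "trend", "return", "roc", "velocity")),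
--     ("spread_reversion", ("spread", "zscore", "reversion", "mean_rev")),
--     ("queue_depletion", ("queue", "depletion", "depth_drop", "book_depth")),
--     ("microprice", ("microprice", "micro_price", "book_pressure", "mid_gap")),
-- )
--
-- def _coarse_feature_bucket(features: list[str]) -> str:
--     if not features:
--         return "none"
--     # Join every feature into ONE haystack with a separator ("\x00") that occurs in
--     # no pattern: a pattern is a substring of some feature iff it is a substring of
--     # the blob (it cannot span the separator), so each pattern is tested exactly once.
--     blob = "\x00".join(features)
--     buckets = {m for m, ps in _MOTIF_PATTERNS if any(p in blob for p in ps)}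
--     buckets.update(t[:20] for f in features if (t := f.split("_", 1)[0]))
--     ordered = sorted(buckets)
--     return "+".join(ordered[:4]) if ordered else "none"
-- ===== Notes on version B (the rewrite author's own statement) =====
-- stated objective: faster
-- what changed: A tests every pattern group against every feature inside a feature-outer loop mutating one set; B joins all features into a single haystack with a separator ("\x00") that occurs in no pattern, tests each of the 17 patterns exactly once against that blob (a pattern cannot span the separator), and collects the token buckets in a separate comprehension pass.
import Mathlib
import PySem

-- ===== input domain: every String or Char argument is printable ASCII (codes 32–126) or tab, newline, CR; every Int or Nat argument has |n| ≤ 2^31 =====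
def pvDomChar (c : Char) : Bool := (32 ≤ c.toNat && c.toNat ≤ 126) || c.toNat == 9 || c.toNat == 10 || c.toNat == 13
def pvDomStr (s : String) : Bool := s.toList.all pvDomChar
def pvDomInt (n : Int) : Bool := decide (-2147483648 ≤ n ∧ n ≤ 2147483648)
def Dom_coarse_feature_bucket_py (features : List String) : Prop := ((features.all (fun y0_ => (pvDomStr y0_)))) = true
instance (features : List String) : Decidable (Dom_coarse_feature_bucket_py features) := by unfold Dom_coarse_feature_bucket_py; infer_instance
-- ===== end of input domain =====

-- B replaces A's feature-outer pattern scan by joining all features into ONE haystack with a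
-- separator ("\x00") that occurs in no pattern, testing each pattern once against that blob
-- (objective: alternative algorithm; a pattern cannot span the separator).

-- _MOTIF_PATTERNS (module constant)
def motifPatterns : List (String × List String) :=
  [("imbalance", ["imbalance", "ofi", "book_imb"]),
   ("momentum", ["momentum", "trend", "return", "roc", "velocity"]),
   ("spread_reversion", ["spread", "zscore", "reversion", "mean_rev"]),
   ("queue_depletion", ["queue", "depletion", "depth_drop", "book_depth"]),
   ("microprice", ["microprice", "micro_price", "book_pressure", "mid_gap"])]

-- feature.split("_", 1)[0]  (split with a non-empty separator always yields a non-empty list,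
-- so the Python [0] never raises; getD/headD only discharge the Option/empty cases)
def tokenOf (feature : String) : String :=
  ((PySem.Str.splitMax? feature "_" 1).getD []).headD ""

-- ===== PORT A =====
-- A's inner loop body: for motif, patterns in _MOTIF_PATTERNS: if any(pattern in feature …): buckets.add(motif)
def stepMotifA (feature : String) (b : PySem.Set String) (mp : String × List String) : PySem.Set String :=
  if mp.2.any (fun p => PySem.Str.isIn p feature) then PySem.Set.add b mp.1 else b

-- A's outer loop body: motif pass, then token = feature.split("_",1)[0]; if token: buckets.add(token[:20])
def stepFeatureA (b : PySem.Set String) (feature : String) : PySem.Set String :=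
  if tokenOf feature ≠ "" then
    PySem.Set.add (motifPatterns.foldl (stepMotifA feature) b)
      (PySem.Str.slice (tokenOf feature) none (some 20))
  else motifPatterns.foldl (stepMotifA feature) b

def coarse_feature_bucket_py (features : List String) : String :=
  if features = [] then "none"
  else
    let buckets : PySem.Set String := features.foldl stepFeatureA PySem.Set.empty
    let ordered := PySem.List.sorted buckets (fun x => x) false
    if ordered ≠ [] then PySem.Str.join "+" (PySem.List.slice ordered none (some 4)) else "none"

-- ===== PORT B =====
-- the comprehension's element: t[:20] for f in features if (t := f.split("_",1)[0])
def tokTrunc (f : String) : Option String :=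
  if tokenOf f ≠ "" then some (PySem.Str.slice (tokenOf f) none (some 20)) else none

def coarse_feature_bucket_py_alt (features : List String) : String :=
  if features = [] then "none"
  else
    let blob := PySem.Str.join "\x00" features
    -- {m for m, ps in _MOTIF_PATTERNS if any(p in blob for p in ps)}  (names are distinct literals)
    let motifs : PySem.Set String := PySem.Set.ofList
      (motifPatterns.filterMap (fun mp =>
        if mp.2.any (fun p => PySem.Str.isIn p blob) then some mp.1 else none))
    -- buckets.update(generator of truncated tokens)
    let buckets : PySem.Set String := PySem.Set.update motifs (features.filterMap tokTrunc)
    let ordered := PySem.List.sorted buckets (fun x => x) false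
    if ordered ≠ [] then PySem.Str.join "+" (PySem.List.slice ordered none (some 4)) else "none"

-- ===== PRECONDITION & SPEC =====
def Spec_coarse_feature_bucket_py (features : List String) (out : String) : Prop := out = coarse_feature_bucket_py_alt features
instance (features : List String) (out : String) : Decidable (Spec_coarse_feature_bucket_py features out) := by unfold Spec_coarse_feature_bucket_py; infer_instance

-- ===== CLAIM (what is proved, stated in full; the proofs are below) =====
def Claim_equal_coarse_feature_bucket_py : Prop := ∀ (features : List String), Dom_coarse_feature_bucket_py features → Spec_coarse_feature_bucket_py features (coarse_feature_bucket_py features)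

-- ===== LEMMAS AND PROOFS =====

-- an occurrence of p cannot straddle c when c ∉ p
theorem infix_append_cons_split {p l1 l2 : List Char} {c : Char} (hc : c ∉ p)
    (h : p <:+: l1 ++ c :: l2) : p <:+: l1 ∨ p <:+: l2 := by
  obtain ⟨s, u, hsu⟩ := h
  by_cases hA : s.length + p.length ≤ l1.length
  · left
    have hsp : s ++ p <+: l1 ++ c :: l2 := ⟨u, by simpa [List.append_assoc] using hsu⟩
    have hl1 : l1 <+: l1 ++ c :: l2 := List.prefix_append _ _
    have hpre : s ++ p <+: l1 :=
      List.prefix_of_prefix_length_le hsp hl1 (by simpa using hA)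
    exact ((List.suffix_append s p).isInfix).trans hpre.isInfix
  by_cases hB : l1.length + 1 ≤ s.length
  · right
    have hs : s <+: l1 ++ c :: l2 := ⟨p ++ u, by simpa [List.append_assoc] using hsu⟩
    have hl1c : l1 ++ [c] <+: l1 ++ c :: l2 := ⟨l2, by simp⟩
    have hpre : l1 ++ [c] <+: s :=
      List.prefix_of_prefix_length_le hl1c hs (by simpa using hB)
    obtain ⟨s2, rfl⟩ := hpre
    refine ⟨s2, u, ?_⟩
    have h2 := hsu
    simp only [List.append_assoc, List.cons_append, List.append_cancel_left_eq, List.cons.injEq, true_and] at h2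
    simpa using h2
  · exfalso
    have hA' : l1.length < s.length + p.length := by omega
    have hC : s.length < l1.length + 1 := by omega
    have hsl : s.length ≤ l1.length := by omega
    have hk : l1.length - s.length < p.length := by omega
    have hlen : l1.length < (s ++ (p ++ u)).length := by
      simp only [List.length_append]; omega
    have e1 : (s ++ (p ++ u))[l1.length]'hlen
        = (p ++ u)[l1.length - s.length]'(by simp only [List.length_append]; omega) :=
      List.getElem_append_right hsl
    have e2 : (p ++ u)[l1.length - s.length]'(by simp only [List.length_append]; omega)
        = p[l1.length - s.length]'hk := List.getElem_append_left hk
    have e3 : (l1 ++ c :: l2)[l1.length]'(by simp) = c := by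
      rw [List.getElem_append_right (Nat.le_refl _)]
      simp
    have hcast : (s ++ (p ++ u)) = l1 ++ c :: l2 := by
      simpa [List.append_assoc] using hsu
    have : p[l1.length - s.length]'hk = c := by
      rw [← e2, ← e1]
      simp only [List.getElem_of_eq hcast, e3]
    exact hc (this ▸ List.getElem_mem hk)

-- a pattern avoiding the separator char is an infix of the joined blob iff of some piece
theorem infix_join_iff (p : List Char) (c : Char) (fs : List (List Char))
    (hp : p ≠ []) (hc : c ∉ p) :
    p <:+: PySem.Chars.join [c] fs ↔ ∃ f ∈ fs, p <:+: f := by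
  induction fs with
  | nil =>
    simp only [List.not_mem_nil, false_and, exists_false, iff_false, PySem.Chars.join_nil]
    intro h
    exact hp (List.eq_nil_of_infix_nil h)
  | cons f rest ih =>
    cases rest with
    | nil =>
      simp [PySem.Chars.join_singleton]
    | cons g rest2 =>
      rw [PySem.Chars.join_cons_cons]
      constructor
      · intro h
        have h' : p <:+: f ++ c :: PySem.Chars.join [c] (g :: rest2) := by
          simpa using h
        rcases infix_append_cons_split hc h' with h1 | h2
        · exact ⟨f, List.mem_cons_self, h1⟩
        · obtain ⟨f', hf', hpf'⟩ := ih.mp h2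
          exact ⟨f', List.mem_cons_of_mem _ hf', hpf'⟩
      · rintro ⟨f', hf', hpf'⟩
        rcases List.mem_cons.mp hf' with rfl | hf'
        · exact hpf'.trans ⟨[], [c] ++ PySem.Chars.join [c] (g :: rest2), by simp⟩
        · exact (ih.mpr ⟨f', hf', hpf'⟩).trans
            ⟨f ++ [c], [], by simp [List.append_assoc]⟩

-- hence 'p in blob' equals 'any(p in f)' for every pattern of the table
theorem isIn_blob_iff (p : String) (features : List String)
    (hp : p.toList ≠ []) (hc : (Char.ofNat 0) ∉ p.toList) :
    PySem.Str.isIn p (PySem.Str.join "\x00" features) = true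
      ↔ ∃ f ∈ features, PySem.Str.isIn p f = true := by
  rw [PySem.Str.isIn_iff_infix, PySem.Str.toList_join]
  have h0 : ("\x00" : String).toList = [Char.ofNat 0] := by decide
  rw [h0, infix_join_iff p.toList (Char.ofNat 0) (features.map String.toList) hp hc]
  constructor
  · rintro ⟨fl, hfl, hp'⟩
    obtain ⟨f, hf, rfl⟩ := List.mem_map.mp hfl
    exact ⟨f, hf, (PySem.Str.isIn_iff_infix _ _).mpr hp'⟩
  · rintro ⟨f, hf, hp'⟩
    exact ⟨f.toList, List.mem_map_of_mem hf, (PySem.Str.isIn_iff_infix _ _).mp hp'⟩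

theorem patterns_ok : ∀ mp ∈ motifPatterns, ∀ p ∈ mp.2,
    p.toList ≠ [] ∧ (Char.ofNat 0) ∉ p.toList := by decide

theorem mem_foldl_stepMotifA (x feature : String) (ps : List (String × List String))
    (b : PySem.Set String) :
    x ∈ ps.foldl (stepMotifA feature) b ↔
      x ∈ b ∨ ∃ mp ∈ ps, x = mp.1 ∧ mp.2.any (fun p => PySem.Str.isIn p feature) := by
  induction ps generalizing b with
  | nil => simp
  | cons hd tl ih =>
    rw [List.foldl_cons, ih, List.exists_mem_cons_iff]
    unfold stepMotifA
    split_ifs with h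
    · rw [PySem.Set.mem_add]
      tauto
    · tauto

theorem nodup_foldl_stepMotifA (feature : String) (ps : List (String × List String))
    (b : PySem.Set String) (hb : b.Nodup) :
    (ps.foldl (stepMotifA feature) b).Nodup := by
  induction ps generalizing b with
  | nil => exact hb
  | cons hd tl ih =>
    apply ih
    unfold stepMotifA
    split_ifs
    · exact PySem.Set.nodup_add b hd.1 hb
    · exact hb

theorem mem_foldl_stepFeatureA (x : String) (fs : List String) (b : PySem.Set String) :
    x ∈ fs.foldl stepFeatureA b ↔
      x ∈ b ∨ (∃ f ∈ fs, ∃ mp ∈ motifPatterns, x = mp.1 ∧ mp.2.any (fun p => PySem.Str.isIn p f))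
            ∨ (∃ f ∈ fs, tokTrunc f = some x) := by
  induction fs generalizing b with
  | nil => simp
  | cons hd tl ih =>
    rw [List.foldl_cons, ih, List.exists_mem_cons_iff, List.exists_mem_cons_iff]
    unfold stepFeatureA tokTrunc
    split_ifs with h
    · rw [PySem.Set.mem_add, mem_foldl_stepMotifA]
      constructor
      · rintro (((hb | hm) | rfl) | hmTl | htTl)
        · exact Or.inl hb
        · exact Or.inr (Or.inl (Or.inl hm))
        · exact Or.inr (Or.inr (Or.inl rfl))
        · exact Or.inr (Or.inl (Or.inr hmTl))
        · exact Or.inr (Or.inr (Or.inr htTl))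
      · rintro (hb | (hmHd | hmTl) | (htHd | htTl))
        · exact Or.inl (Or.inl (Or.inl hb))
        · exact Or.inl (Or.inl (Or.inr hmHd))
        · exact Or.inr (Or.inl hmTl)
        · exact Or.inl (Or.inr (Option.some.inj htHd).symm)
        · exact Or.inr (Or.inr htTl)
    · rw [mem_foldl_stepMotifA]
      constructor
      · rintro ((hb | hm) | hmTl | htTl)
        · exact Or.inl hb
        · exact Or.inr (Or.inl (Or.inl hm))
        · exact Or.inr (Or.inl (Or.inr hmTl))
        · exact Or.inr (Or.inr (Or.inr htTl))
      · rintro (hb | (hmHd | hmTl) | (htHd | htTl))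
        · exact Or.inl (Or.inl hb)
        · exact Or.inl (Or.inr hmHd)
        · exact Or.inr (Or.inl hmTl)
        · exact absurd htHd (by simp)
        · exact Or.inr (Or.inr htTl)

theorem nodup_foldl_stepFeatureA (fs : List String) (b : PySem.Set String) (hb : b.Nodup) :
    (fs.foldl stepFeatureA b).Nodup := by
  induction fs generalizing b with
  | nil => exact hb
  | cons hd tl ih =>
    apply ih
    unfold stepFeatureA
    have h1 := nodup_foldl_stepMotifA hd motifPatterns b hb
    split_ifs
    · exact PySem.Set.nodup_add _ _ h1
    · exact h1

-- the two bucket sets hold the same elements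
theorem buckets_perm (features : List String) :
    (features.foldl stepFeatureA PySem.Set.empty).Perm
      (PySem.Set.update
        (PySem.Set.ofList (motifPatterns.filterMap (fun mp =>
          if mp.2.any (fun p => PySem.Str.isIn p (PySem.Str.join "\x00" features)) then some mp.1 else none)))
        (features.filterMap tokTrunc)) := by
  refine (List.perm_ext_iff_of_nodup
    (nodup_foldl_stepFeatureA features PySem.Set.empty List.nodup_nil)
    (PySem.Set.nodup_update _ _ (PySem.Set.nodup_ofList _))).mpr ?_
  intro a
  rw [mem_foldl_stepFeatureA, PySem.Set.mem_update, PySem.Set.mem_ofList,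
    List.mem_filterMap, List.mem_filterMap]
  constructor
  · rintro (hb | (⟨f, hf, mp, hmp, rfl, hany⟩ | ⟨f, hf, ht⟩))
    · exact absurd hb (by simp [PySem.Set.empty])
    · refine Or.inl ⟨mp, hmp, ?_⟩
      have hblob : mp.2.any (fun p => PySem.Str.isIn p (PySem.Str.join "\x00" features)) = true := by
        rw [List.any_eq_true] at hany ⊢
        obtain ⟨p, hp, hin⟩ := hany
        obtain ⟨hpne, hpc⟩ := patterns_ok mp hmp p hp
        exact ⟨p, hp, (isIn_blob_iff p features hpne hpc).mpr ⟨f, hf, hin⟩⟩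
      rw [if_pos hblob]
    · exact Or.inr ⟨f, hf, ht⟩
  · rintro (⟨mp, hmp, hsome⟩ | ⟨f, hf, ht⟩)
    · by_cases hblob : mp.2.any (fun p => PySem.Str.isIn p (PySem.Str.join "\x00" features)) = true
      · rw [if_pos hblob] at hsome
        obtain rfl := Option.some.inj hsome
        rw [List.any_eq_true] at hblob
        obtain ⟨p, hp, hin⟩ := hblob
        obtain ⟨hpne, hpc⟩ := patterns_ok mp hmp p hp
        obtain ⟨f, hf, hinf⟩ := (isIn_blob_iff p features hpne hpc).mp hin
        refine Or.inr (Or.inl ⟨f, hf, mp, hmp, rfl, ?_⟩)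
        rw [List.any_eq_true]
        exact ⟨p, hp, hinf⟩
      · rw [if_neg hblob] at hsome
        exact absurd hsome (by simp)
    · exact Or.inr (Or.inr ⟨f, hf, ht⟩)

-- ===== VERDICT (by name: the statement is the Claim_ definition above) =====
theorem coarse_feature_bucket_py_spec : Claim_equal_coarse_feature_bucket_py := by
  intro features _
  unfold Spec_coarse_feature_bucket_py coarse_feature_bucket_py coarse_feature_bucket_py_alt
  by_cases hnil : features = []
  · subst hnil; rfl
  · simp only [if_neg hnil]
    have hsorted := (PySem.List.sorted_id_eq_sorted_id_iff_perm _ _).mpr (buckets_perm features)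
    simp only [hsorted]
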